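-- pv_equiv track=rewrite | github.com/viktor-bujko/avisaf | avisaf/util/indexing.py | find_indexes
-- ===== SOURCE A (Python) =====
-- def find_indexes(text: str, span: str, start_offset: int):
--     """Method which returns the indexes of a substring of a string, if such
--     substring exists, otherwise return (-1, -1) tuple.
--
--     :type text: str
--     :param text: The source text to be searched in for the span.
--     :type span: str
--     :param span: A substring to be searched for in the text.
--     :type start_offset: int
--     :param start_offset: The index of the text where the search is started.
--
--     :return: (start_index, end_index) tuple or (-1, -1) if span is not in the text.
--     """
--     try:
--         result = []
--         start_index = str(text).index(
--             span, start_offset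
--         )  # find starting index of the span in the text
--         end_index = start_index + len(span)  # get the end_index of the span
--         if not text[
--             end_index
--         ].isalnum():  # ensure, that the span is not the substring of another word
--             result.append((start_index, end_index))
--             others = [pair for pair in find_indexes(text, span, end_index)]
--             result += others
--         return result
--
--     except ValueError:
--         return [(-1, -1)]
-- ===== SOURCE B (Python) =====
-- def find_indexes(text: str, span: str, start_offset: int):
--     """Two-phase rewrite: first collect every occurrence position of span in
--     text at or after the (slice-clamped) offset, then make one greedy pass
--     over that list, skipping overlaps, stopping at an alnum-followed match,
--     and appending the (-1, -1) sentinel when the list is exhausted."""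
--     text = str(text)
--     n, m = len(text), len(span)
--     lo = start_offset if start_offset >= 0 else max(0, n + start_offset)
--     positions = [i for i in range(lo, n - m + 1) if text[i:i + m] == span]
--     out = []
--     cur = lo
--     for p in positions:
--         if p < cur:
--             continue
--         end = p + m
--         if text[end].isalnum():
--             return out
--         out.append((p, end))
--         cur = end
--     out.append((-1, -1))
--     return out
-- ===== Notes on version B (the rewrite author's own statement) =====
-- stated objective: alternative
-- what changed: Replaces A's recursion that re-calls str.index at every level and rebuilds result lists by concatenation with a two-phase pass: one comprehension collecting every occurrence position of span up front, then a single greedy loop over that list with an overlap cursor and one accumulator.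
-- outside the precondition, e.g. on find_indexes('a!a!a', 'a!a', 0): A returns [(0, 3), (-1, -1)], B returns [(0, 3), (-1, -1)]
import Mathlib
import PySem

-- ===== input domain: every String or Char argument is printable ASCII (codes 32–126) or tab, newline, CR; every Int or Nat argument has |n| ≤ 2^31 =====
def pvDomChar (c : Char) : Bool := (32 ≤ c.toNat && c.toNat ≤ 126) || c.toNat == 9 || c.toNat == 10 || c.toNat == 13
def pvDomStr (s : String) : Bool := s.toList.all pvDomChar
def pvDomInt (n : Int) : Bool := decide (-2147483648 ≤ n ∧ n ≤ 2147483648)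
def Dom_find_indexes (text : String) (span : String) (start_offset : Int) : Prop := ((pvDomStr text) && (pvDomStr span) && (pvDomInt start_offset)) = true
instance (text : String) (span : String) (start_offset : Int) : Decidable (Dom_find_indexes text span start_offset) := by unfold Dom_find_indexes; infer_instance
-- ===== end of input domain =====

-- B replaces A's recursion-with-repeated-str.index by a two-phase pass: collect all
-- occurrence positions once, then one greedy scan over that list; return value only.

-- ===== PORT A =====
-- A's recursion: text.index(span, off); on ValueError return [(-1,-1)]; else inspect
-- text[end]; if not alnum, cons the pair onto the recursive call from end. The recursion
-- is made structural with fuel text.length + 2, enough whenever it terminates (each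
-- successful find moves the offset forward by at least max(1,|span|) from a position
-- ≥ 0); fuel 0 and the IndexError branch (text[end] out of range: Python raises,
-- excluded by Pre_) return [].
def findIndexesRec (text span : String) : Nat → Int → List (Int × Int)
  | 0, _ => []
  | fuel + 1, off =>
    let start_index := PySem.Str.findFrom text span off none
    if start_index = -1 then [(-1, -1)]        -- ValueError branch
    else
      let end_index := start_index + (PySem.Str.len span : Int)
      match PySem.Str.pyGet? text end_index with
      | none => []                             -- IndexError: Python raises; outside Pre_
      | some c =>
        if PySem.Chars.isalnum c then []
        else (start_index, end_index) :: findIndexesRec text span fuel end_index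

def find_indexes (text : String) (span : String) (start_offset : Int) : List (Int × Int) :=
  findIndexesRec text span (text.length + 2) start_offset

-- ===== PORT B =====
-- Source B's clamped start: lo = start_offset if start_offset >= 0 else max(0, n + start_offset)
def altLo (text : String) (start_offset : Int) : Int :=
  if 0 ≤ start_offset then start_offset
  else max 0 ((PySem.Str.len text : Int) + start_offset)

-- Source B's comprehension: [i for i in range(lo, n - m + 1) if text[i:i+m] == span]
def altPositions (text span : String) (lo : Int) : List Int :=
  (PySem.List.pyRange lo ((PySem.Str.len text : Int) - (PySem.Str.len span : Int) + 1) 1).filter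
    (fun i => PySem.Str.slice text (some i) (some (i + (PySem.Str.len span : Int))) == span)

-- Source B's for-loop over positions with cursor cur and accumulator out
def altScan (text : String) (m : Int) : List Int → Int → List (Int × Int) → List (Int × Int)
  | [], _, out => out ++ [(-1, -1)]            -- loop exhausted: append the sentinel
  | p :: ps, cur, out =>
    if p < cur then altScan text m ps cur out  -- overlap: continue
    else
      match PySem.Str.pyGet? text (p + m) with
      | none => out                            -- IndexError: Python raises; outside Pre_
      | some c =>
        if PySem.Chars.isalnum c then out      -- early return
        else altScan text m ps (p + m) (out ++ [(p, p + m)])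

def find_indexes_alt (text : String) (span : String) (start_offset : Int) : List (Int × Int) :=
  altScan text (PySem.Str.len span) (altPositions text span (altLo text start_offset))
    (altLo text start_offset) []

-- ===== PRECONDITION & SPEC =====
-- Pre_ excludes only inputs on which A raises (plus a rare corner noted below):
-- for an empty span it admits exactly the two returning cases (offset past the end:
-- [(-1,-1)]; an alnum char at the clamped offset: []) and excludes the IndexError at
-- offset == len(text) and the infinite recursion on a non-alnum char; for a nonempty
-- span it excludes texts ending with span whose in-range earlier occurrences are all
-- followed by non-alnum chars — there the scan reaches the final occurrence and
-- text[end_index] raises IndexError, except in a rare periodic-overlap corner (the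
-- final occurrence overlaps the previously matched one and is skipped, A returns and
-- B agrees) which this conservative condition excludes together with the crashes.
def Pre_find_indexes (text : String) (span : String) (start_offset : Int) : Prop :=
  let n : Int := (PySem.Str.len text : Int)
  let m : Int := (PySem.Str.len span : Int)
  let e : Int := if start_offset < 0 then max 0 (n + start_offset) else start_offset
  if span = "" then
    n < start_offset ∨
      (e < n ∧ (PySem.Str.pyGet? text e).map PySem.Chars.isalnum = some true)
  else
    ¬ (PySem.Str.endswith text span = true ∧ e ≤ n - m ∧
        ∀ p ∈ PySem.List.pyRange e (n - m) 1,
          PySem.Str.slice text (some p) (some (p + m)) = span →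
          (PySem.Str.pyGet? text (p + m)).map PySem.Chars.isalnum = some false)
instance (text : String) (span : String) (start_offset : Int) : Decidable (Pre_find_indexes text span start_offset) := by unfold Pre_find_indexes; infer_instance
def pvWitness_find_indexes : String × String × Int := ("a b a x", "a", 0)

def Spec_find_indexes (text : String) (span : String) (start_offset : Int) (out : List (Int × Int)) : Prop := out = find_indexes_alt text span start_offset
instance (text : String) (span : String) (start_offset : Int) (out : List (Int × Int)) : Decidable (Spec_find_indexes text span start_offset out) := by unfold Spec_find_indexes; infer_instance

-- ===== CLAIM (what is proved, stated in full; the proofs are below) =====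
def Claim_equal_find_indexes : Prop := ∀ (text : String) (span : String) (start_offset : Int), Dom_find_indexes text span start_offset → Pre_find_indexes text span start_offset → Spec_find_indexes text span start_offset (find_indexes text span start_offset)

-- ===== LEMMAS AND PROOFS =====

-- ---- generic facts about PySem.List.pyRange ----
theorem pyRangeOne_nil {a b : Int} (h : b ≤ a) : PySem.List.pyRange a b = [] := by
  apply List.eq_nil_iff_forall_not_mem.mpr
  intro x hx
  rw [PySem.List.mem_pyRange_one] at hx
  omega

theorem pyRangeOne_length_aux : ∀ (n : Nat) (a b : Int), (b - a).toNat = n →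
    (PySem.List.pyRange a b).length = n := by
  intro n
  induction n with
  | zero => intro a b h; rw [pyRangeOne_nil (by omega)]; rfl
  | succ k ih =>
    intro a b h
    rw [PySem.List.pyRange_one_cons (by omega)]
    simp [ih (a + 1) b (by omega)]

theorem pyRangeOne_pairwise_aux : ∀ (n : Nat) (a b : Int), (b - a).toNat = n →
    (PySem.List.pyRange a b).Pairwise (· < ·) := by
  intro n
  induction n with
  | zero => intro a b h; rw [pyRangeOne_nil (by omega)]; exact List.Pairwise.nil
  | succ k ih =>
    intro a b h
    rw [PySem.List.pyRange_one_cons (by omega)]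
    refine List.Pairwise.cons ?_ (ih (a + 1) b (by omega))
    intro x hx
    rw [PySem.List.mem_pyRange_one] at hx
    omega

-- ---- facts about PySem.Chars.findFrom ----
-- findFrom's definition, with the start clamped as a slice bound and take-length removed
theorem findFrom_eval (s sub : List Char) (st : Int) :
    PySem.Chars.findFrom s sub st none =
      (if (s.length : Int) < (if st < 0 then max 0 (st + s.length) else st) then -1
       else
         if PySem.Chars.find (s.drop (if st < 0 then max 0 (st + s.length) else st).toNat) sub = -1 then -1
         else (if st < 0 then max 0 (st + s.length) else st) +
           PySem.Chars.find (s.drop (if st < 0 then max 0 (st + s.length) else st).toNat) sub) := by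
  simp only [PySem.Chars.findFrom, Int.toNat_natCast, List.take_length]
  by_cases h1 : st < 0
  · by_cases h2 : st + (s.length : Int) < 0
    · simp only [if_pos h1, if_pos h2, show max 0 (st + (s.length : Int)) = 0 by omega]
    · simp only [if_pos h1, if_neg h2, show max 0 (st + (s.length : Int)) = st + s.length by omega]
  · simp only [if_neg h1]

theorem findFrom_clamp (s sub : List Char) (st : Int) :
    PySem.Chars.findFrom s sub st none =
      PySem.Chars.findFrom s sub (if st < 0 then max 0 ((s.length : Int) + st) else st) none := by
  rw [findFrom_eval, findFrom_eval s sub (if st < 0 then max 0 ((s.length : Int) + st) else st)]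
  by_cases h1 : st < 0
  · simp only [if_pos h1, if_neg (show ¬ max 0 ((s.length : Int) + st) < 0 by omega),
      show max 0 (st + (s.length : Int)) = max 0 ((s.length : Int) + st) by omega]
  · simp only [if_neg h1]

theorem findFrom_past_len (s sub : List Char) (st : Int) (h : (s.length : Int) < st) :
    PySem.Chars.findFrom s sub st none = -1 := by
  rw [findFrom_eval, if_pos (by omega)]

theorem findFrom_nil (s : List Char) (st : Int) (h0 : 0 ≤ st) (h1 : st ≤ (s.length : Int)) :
    PySem.Chars.findFrom s [] st none = st := by
  rw [findFrom_eval]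
  simp only [if_neg (show ¬ st < 0 by omega), PySem.Chars.find_nil, if_neg (show ¬ (s.length : Int) < st by omega)]
  norm_num

theorem occ_le (s sub : List Char) (p : Int) (hp : 0 ≤ p) (hsub : sub ≠ [])
    (hocc : sub <+: s.drop p.toNat) : p + (sub.length : Int) ≤ (s.length : Int) := by
  have h1 : sub.length ≤ (s.drop p.toNat).length := hocc.length_le
  rw [List.length_drop] at h1
  have h2 : p.toNat ≤ s.length := by
    by_contra hc
    have : s.drop p.toNat = [] := List.drop_eq_nil_of_le (by omega)
    rw [this, List.prefix_nil] at hocc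
    exact hsub hocc
  omega

theorem findFrom_no_occ (s sub : List Char) (k : Int) (hk : 0 ≤ k)
    (h : ∀ p : Int, k ≤ p → ¬ sub <+: s.drop p.toNat) :
    PySem.Chars.findFrom s sub k none = -1 := by
  by_cases hkn : k ≤ (s.length : Int)
  · rw [show k = ((k.toNat : Nat) : Int) by omega]
    rw [PySem.Chars.findFrom_natCast_eq_neg_one_iff s sub k.toNat (by omega)]
    intro hinf
    rw [← PySem.Chars.isIn_iff_infix, ← PySem.Chars.exists_prefix_drop_iff_isIn] at hinf
    obtain ⟨j, hj⟩ := hinf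
    rw [List.drop_drop] at hj
    exact h ((k.toNat + j : Nat) : Int) (by omega) (by rw [Int.toNat_natCast]; exact hj)
  · exact findFrom_past_len s sub k (by omega)

theorem findFrom_first_occ (s sub : List Char) (k p : Int) (hsub : sub ≠ [])
    (hk : 0 ≤ k) (hkp : k ≤ p) (hocc : sub <+: s.drop p.toNat)
    (hmin : ∀ q : Int, k ≤ q → q < p → ¬ sub <+: s.drop q.toNat) :
    PySem.Chars.findFrom s sub k none = p := by
  have hple := occ_le s sub p (by omega) hsub hocc
  have hsublen : 1 ≤ sub.length := by
    cases sub with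
    | nil => exact absurd rfl hsub
    | cons a l => simp
  have hkn : k ≤ (s.length : Int) := by omega
  have hkk : k = ((k.toNat : Nat) : Int) := by omega
  have hne : PySem.Chars.findFrom s sub (k.toNat : Int) none ≠ -1 := by
    simp only [ne_eq, PySem.Chars.findFrom_natCast_eq_neg_one_iff s sub k.toNat (by omega), not_not]
    rw [← PySem.Chars.isIn_iff_infix, ← PySem.Chars.exists_prefix_drop_iff_isIn]
    exact ⟨p.toNat - k.toNat, by rw [List.drop_drop, show k.toNat + (p.toNat - k.toNat) = p.toNat by omega]; exact hocc⟩
  obtain ⟨h1, h2, h3⟩ := PySem.Chars.findFrom_natCast_spec s sub k.toNat (by omega) hne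
  set r := PySem.Chars.findFrom s sub (k.toNat : Int) none with hr
  rw [hkk]
  by_cases hlt : r < p
  · exact absurd h2 (hmin r (by omega) hlt)
  · by_cases hgt : p < r
    · exact absurd hocc (h3 p.toNat (by omega) (by omega))
    · omega

-- ---- the core correspondence: B's greedy scan over an occurrence list vs A's recursion ----
theorem scan_eq (text span : String) (hsp : span.toList ≠ []) :
    ∀ (ps : List Int) (fuel : Nat) (cur : Int) (acc : List (Int × Int)),
      0 ≤ cur →
      (∀ q ∈ ps, 0 ≤ q ∧ span.toList <+: text.toList.drop q.toNat) →
      (∀ q : Int, cur ≤ q → 0 ≤ q → span.toList <+: text.toList.drop q.toNat → q ∈ ps) →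
      ps.Pairwise (· < ·) →
      ps.length < fuel →
      altScan text (PySem.Str.len span) ps cur acc = acc ++ findIndexesRec text span fuel cur := by
  have hm1 : (1:Int) ≤ (PySem.Str.len span : Int) := by
    rw [PySem.Str.len_eq]
    cases hc : span.toList with
    | nil => exact absurd hc hsp
    | cons a l => simp
  intro ps
  induction ps with
  | nil =>
    intro fuel cur acc hcur hsound hcomp hpw hlen
    cases fuel with
    | zero => omega
    | succ f =>
      have hfind : PySem.Str.findFrom text span cur none = -1 := by
        rw [PySem.Str.findFrom_eq]
        refine findFrom_no_occ _ _ cur hcur (fun p hp hpre => ?_)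
        exact absurd (hcomp p hp (le_trans hcur hp) hpre) List.not_mem_nil
      simp only [altScan, findIndexesRec, hfind]
      norm_num
  | cons p ps ih =>
    intro fuel cur acc hcur hsound hcomp hpw hlen
    cases fuel with
    | zero => omega
    | succ f =>
      by_cases hpc : p < cur
      · rw [show altScan text (PySem.Str.len span) (p :: ps) cur acc
              = altScan text (PySem.Str.len span) ps cur acc by simp [altScan, hpc]]
        refine ih (f + 1) cur acc hcur (fun q hq => hsound q (List.mem_cons_of_mem p hq))
          (fun q hq hq0 hqocc => ?_) hpw.of_cons (by simp at hlen; omega)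
        rcases List.mem_cons.mp (hcomp q hq hq0 hqocc) with h | h
        · omega
        · exact h
      · obtain ⟨hp0, hpocc⟩ := hsound p (List.mem_cons_self ..)
        have hfind : PySem.Str.findFrom text span cur none = p := by
          rw [PySem.Str.findFrom_eq]
          refine findFrom_first_occ _ _ cur p hsp hcur (by omega) hpocc ?_
          intro q hq hqp hqocc
          rcases List.mem_cons.mp (hcomp q hq (le_trans hcur hq) hqocc) with h | h
          · omega
          · exact absurd hqp (by have := List.rel_of_pairwise_cons hpw h; omega)
        simp only [findIndexesRec, altScan, hfind, if_neg (show ¬ p < cur from hpc),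
          if_neg (show ¬ p = -1 by omega)]
        cases hget : PySem.Str.pyGet? text (p + (PySem.Str.len span : Int)) with
        | none => simp
        | some c =>
          by_cases hal : PySem.Chars.isalnum c = true
          · simp [hal]
          · simp only [Bool.not_eq_true] at hal
            simp only [hal, Bool.false_eq_true, if_false]
            rw [ih f (p + (PySem.Str.len span : Int)) (acc ++ [(p, p + (PySem.Str.len span : Int))])
              (by omega)
              (fun q hq => hsound q (List.mem_cons_of_mem p hq))
              (fun q hq hq0 hqocc => by
                rcases List.mem_cons.mp (hcomp q (by omega) hq0 hqocc) with h | h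
                · omega
                · exact h)
              hpw.of_cons (by simp at hlen; omega)]
            simp

-- the clamped offset altLo is what A's first str.index call effectively searches from
theorem altLo_eval (text : String) (off : Int) :
    altLo text off = if off < 0 then max 0 ((text.toList.length : Int) + off) else off := by
  unfold altLo
  simp only [PySem.Str.len_eq]
  split_ifs <;> omega

theorem rec_clamp (text span : String) (f : Nat) (off : Int) :
    findIndexesRec text span (f + 1) off = findIndexesRec text span (f + 1) (altLo text off) := by
  have h : PySem.Str.findFrom text span off none = PySem.Str.findFrom text span (altLo text off) none := by
    rw [PySem.Str.findFrom_eq, PySem.Str.findFrom_eq, altLo_eval, findFrom_clamp]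
  simp only [findIndexesRec, h]

-- membership in Source B's comprehension = being an occurrence position in [lo, n-m]
theorem slice_eq_span_iff (text span : String) (q : Int) (h0 : 0 ≤ q) :
    (PySem.Str.slice text (some q) (some (q + (PySem.Str.len span : Int))) == span) = true ↔
      span.toList <+: text.toList.drop q.toNat := by
  rw [beq_iff_eq, ← String.toList_inj, PySem.Str.toList_slice, PySem.Chars.slice_eq_listSlice,
    PySem.List.slice_toNat text.toList h0 (by rw [PySem.Str.len_eq]; omega),
    show (q + (PySem.Str.len span : Int)).toNat - q.toNat = span.toList.length by
      rw [PySem.Str.len_eq]; omega]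
  constructor
  · intro h; rw [← h]; exact List.take_prefix _ _
  · intro h; exact ((List.prefix_iff_eq_take.mp h).symm)

theorem mem_altPositions (text span : String) (lo q : Int) (hlo : 0 ≤ lo) :
    q ∈ altPositions text span lo ↔
      lo ≤ q ∧ 0 ≤ q ∧ span.toList <+: text.toList.drop q.toNat ∧
        q + (span.toList.length : Int) ≤ (text.toList.length : Int) := by
  unfold altPositions
  rw [List.mem_filter, PySem.List.mem_pyRange_one]
  constructor
  · rintro ⟨⟨h1, h2⟩, h3⟩
    have h0 : (0:Int) ≤ q := le_trans hlo h1
    have hpre := (slice_eq_span_iff text span q h0).mp h3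
    refine ⟨h1, h0, hpre, ?_⟩
    simp only [PySem.Str.len_eq] at h2
    have := hpre.length_le
    rw [List.length_drop] at this
    omega
  · rintro ⟨h1, h0, hpre, h4⟩
    refine ⟨⟨h1, ?_⟩, (slice_eq_span_iff text span q h0).mpr hpre⟩
    simp only [PySem.Str.len_eq]
    omega

theorem altLo_nonneg (text : String) (off : Int) : 0 ≤ altLo text off := by
  unfold altLo; split <;> omega

-- the whole equivalence for a nonempty span (no precondition needed: at the inputs
-- where Python raises IndexError both ports return the pairs accumulated so far)
theorem main_nonempty (text span : String) (off : Int) (hsp : span.toList ≠ []) :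
    find_indexes text span off = find_indexes_alt text span off := by
  unfold find_indexes find_indexes_alt
  rw [show text.length + 2 = (text.length + 1) + 1 from rfl, rec_clamp]
  have hlo := altLo_nonneg text off
  have hfl : (altPositions text span (altLo text off)).length < text.length + 1 + 1 := by
    have h1 := List.length_filter_le
      (fun i => PySem.Str.slice text (some i) (some (i + (PySem.Str.len span : Int))) == span)
      (PySem.List.pyRange (altLo text off) ((PySem.Str.len text : Int) - (PySem.Str.len span : Int) + 1))
    have h2 := pyRangeOne_length_aux _ (altLo text off)
      ((PySem.Str.len text : Int) - (PySem.Str.len span : Int) + 1) rfl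
    unfold altPositions
    simp only [PySem.Str.len_eq] at h1 h2 ⊢
    rw [h2] at h1
    have h3 : text.toList.length = text.length := String.length_toList
    omega
  rw [scan_eq text span hsp (altPositions text span (altLo text off)) (text.length + 1 + 1)
    (altLo text off) [] hlo
    (fun q hq =>
      ⟨((mem_altPositions text span _ q hlo).mp hq).2.1,
       ((mem_altPositions text span _ q hlo).mp hq).2.2.1⟩)
    (fun q hq hq0 hocc => (mem_altPositions text span _ q hlo).mpr
      ⟨hq, hq0, hocc, occ_le text.toList span.toList q hq0 hsp hocc⟩)
    ((pyRangeOne_pairwise_aux _ _ ((PySem.Str.len text : Int) - (PySem.Str.len span : Int) + 1) rfl).sublist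
      List.filter_sublist)
    hfl]
  simp

-- the whole equivalence for the empty span, on the two returning cases Pre_ admits
theorem main_empty (text : String) (off : Int) (hpre : Pre_find_indexes text "" off) :
    find_indexes text "" off = find_indexes_alt text "" off := by
  have hlen0 : (PySem.Str.len ("" : String) : Int) = 0 := by simp [PySem.Str.len_eq]
  unfold Pre_find_indexes at hpre
  simp only [PySem.Str.len_eq] at hpre
  unfold find_indexes find_indexes_alt altPositions
  rw [show text.length + 2 = (text.length + 1) + 1 from rfl]
  rcases hpre with h1 | ⟨hEn, hmap⟩
  · -- offset past the end: both sides produce [(-1, -1)]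
    have hff : PySem.Str.findFrom text "" off none = -1 := by
      rw [PySem.Str.findFrom_eq]
      exact findFrom_past_len _ _ off (by omega)
    have hA : altLo text off = off := by rw [altLo_eval]; omega
    rw [hA, pyRangeOne_nil (by rw [hlen0, PySem.Str.len_eq]; omega)]
    simp only [findIndexesRec, altScan, hff, List.filter_nil]
    simp
  · -- an alphanumeric character at the clamped offset: both sides return []
    obtain ⟨c, hc, hcal⟩ := Option.map_eq_some_iff.mp hmap
    set E : Int := if off < 0 then max 0 ((text.toList.length : Int) + off) else off with hE
    have hE0 : 0 ≤ E := by rw [hE]; split <;> omega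
    have haltlo : altLo text off = E := altLo_eval text off
    have hff : PySem.Str.findFrom text "" off none = E := by
      rw [PySem.Str.findFrom_eq, findFrom_clamp]
      exact findFrom_nil text.toList E hE0 (by omega)
    have hpred : (fun i => PySem.Str.slice text (some i) (some (i + (PySem.Str.len ("" : String) : Int))) == ("" : String)) E = true :=
      (slice_eq_span_iff text "" E hE0).mpr (List.nil_prefix)
    have hfc : List.filter
        (fun i => PySem.Str.slice text (some i) (some (i + (PySem.Str.len ("" : String) : Int))) == ("" : String))
        (E :: PySem.List.pyRange (E + 1) ((PySem.Str.len text : Int) - (PySem.Str.len ("" : String) : Int) + 1))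
        = E :: List.filter
        (fun i => PySem.Str.slice text (some i) (some (i + (PySem.Str.len ("" : String) : Int))) == ("" : String))
        (PySem.List.pyRange (E + 1) ((PySem.Str.len text : Int) - (PySem.Str.len ("" : String) : Int) + 1)) :=
      List.filter_cons_of_pos hpred
    have hff' : PySem.Chars.findFrom text.toList [] off none = E := by simpa using hff
    have hc' : PySem.List.pyGet? text.toList E = some c := by simpa using hc
    rw [haltlo, PySem.List.pyRange_one_cons (by rw [hlen0, PySem.Str.len_eq]; omega), hfc]
    simp [findIndexesRec, altScan, hff', hc', hcal, show ¬ E = -1 by omega]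

-- ===== VERDICT (by name: the statement is the Claim_ definition above) =====
theorem find_indexes_spec : Claim_equal_find_indexes := by
  intro text span off hdom hpre
  unfold Spec_find_indexes
  by_cases hspan : span = ""
  · subst hspan
    exact main_empty text off hpre
  · refine main_nonempty text span off (fun h => hspan ?_)
    exact String.toList_inj.mp (by simpa using h)
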